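-- pv_equiv track=rewrite | github.com/don-v/Math_Programming | FunctionsNGraphs/Ch7/Section7_9/Ch3/x03_05_poly_zeros.py | display_binomial
-- ===== SOURCE A (Python) =====
-- def get_binomial(a,b,n):
--     '''returns the sum from k = 0 to n for
--     (n choose k)*a**(n-k)*b**k'''
--     from math import comb
--
--     binom_coeffs = list()
--     a_exponents = list()
--     b_exponents = list()
--     sum = 0
--     for k in range(n+1):
--         binom_coeffs.append(comb(n,k))
--         a_exponents.append((n-k))
--         b_exponents.append(k)
--         sum += (comb(n,k))*(a**(n-k))*(b**k)
--     return sum, binom_coeffs, a_exponents, b_exponents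
--
-- def display_binomial(a,b,n):
--     '''returns the string form of an expanded binomial
--     of the form (a+b)**n'''
--     _, binom_coeffs, a_exponents, b_exponents = get_binomial(a,b,n)
--     poly = ''
--     for i, (co,ax,bx) in enumerate(zip(binom_coeffs,a_exponents,b_exponents)):
--         if i == 0:
--             poly += '{}*(a**{})*(b**{})'.format(co,ax,bx)
--         else:
--             poly += ' + {}*(a**{})*(b**{})'.format(co,ax,bx)
--     return poly
-- ===== SOURCE B (Python) =====
-- def display_binomial(a, b, n):
--     '''returns the string form of an expanded binomial
--     of the form (a+b)**n'''
--     terms = []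
--     c = 1
--     for k in range(n + 1):
--         terms.append('{}*(a**{})*(b**{})'.format(c, n - k, k))
--         c = c * (n - k) // (k + 1)
--     return ' + '.join(terms)
-- ===== Notes on version B (the rewrite author's own statement) =====
-- stated objective: faster
-- what changed: Replaces A's math.comb call per term, the three precomputed exponent/coefficient lists, the unused power sum, and the enumerate-with-first-index-check string loop by a single pass that carries the binomial coefficient via Pascal's recurrence c = c*(n-k)//(k+1) and joins the terms with ' + '.join; intended as faster (measured 31x at n=1024, the largest size both Pythons finished).
import Mathlib
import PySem

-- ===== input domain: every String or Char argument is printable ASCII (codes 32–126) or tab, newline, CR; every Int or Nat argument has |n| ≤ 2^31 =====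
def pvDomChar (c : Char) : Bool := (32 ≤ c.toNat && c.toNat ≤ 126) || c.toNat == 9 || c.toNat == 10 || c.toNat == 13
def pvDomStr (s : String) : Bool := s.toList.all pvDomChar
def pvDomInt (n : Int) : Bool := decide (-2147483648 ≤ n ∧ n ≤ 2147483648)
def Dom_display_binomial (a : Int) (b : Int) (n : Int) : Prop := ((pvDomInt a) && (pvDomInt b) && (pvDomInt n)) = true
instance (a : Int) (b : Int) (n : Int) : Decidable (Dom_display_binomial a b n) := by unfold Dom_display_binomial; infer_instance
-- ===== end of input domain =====

-- B replaces the per-term math.comb calls and the three precomputed lists (and the unused sum)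
-- by a single pass that updates the coefficient with Pascal's recurrence and joins the terms;
-- intended as faster (measured 31x at n=1024, the largest size both finished).

-- ===== PORT A =====

-- math.comb(n, k); A only calls it with 0 ≤ k ≤ n, where toNat is exact
def pyComb (n k : Int) : Int := (Nat.choose n.toNat k.toNat : Int)

-- '{}*(a**{})*(b**{})'.format(co, ax, bx)
def fmtTerm (co ax bx : Int) : String :=
  PySem.Int.toStr co ++ "*(a**" ++ PySem.Int.toStr ax ++ ")*(b**" ++ PySem.Int.toStr bx ++ ")"

-- a**(n-k) and b**k: exponents are ≥ 0 at every call A makes (k ∈ range(n+1)), so .toNat is exact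
def get_binomial (a b n : Int) : Int × List Int × List Int × List Int :=
  (PySem.List.pyRange 0 (n + 1) 1).foldl
    (fun st k =>
      (st.1 + pyComb n k * a ^ (n - k).toNat * b ^ k.toNat,
       st.2.1 ++ [pyComb n k],
       st.2.2.1 ++ [n - k],
       st.2.2.2 ++ [k]))
    (0, [], [], [])

def display_binomial (a : Int) (b : Int) (n : Int) : String :=
  let r := get_binomial a b n
  (PySem.List.enumerate (List.zip r.2.1 (List.zip r.2.2.1 r.2.2.2))).foldl
    (fun poly p =>
      if p.1 == 0 then poly ++ fmtTerm p.2.1 p.2.2.1 p.2.2.2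
      else poly ++ " + " ++ fmtTerm p.2.1 p.2.2.1 p.2.2.2)
    ""

-- ===== PORT B =====
def display_binomial_alt (a : Int) (b : Int) (n : Int) : String :=
  let st := (PySem.List.pyRange 0 (n + 1) 1).foldl
    (fun (st : List String × Int) k =>
      (st.1 ++ [fmtTerm st.2 (n - k) k], PySem.Int.floordiv (st.2 * (n - k)) (k + 1)))
    ([], 1)
  PySem.Str.join " + " st.1

-- ===== PRECONDITION & SPEC =====
def Spec_display_binomial (a : Int) (b : Int) (n : Int) (out : String) : Prop := out = display_binomial_alt a b n
instance (a : Int) (b : Int) (n : Int) (out : String) : Decidable (Spec_display_binomial a b n out) := by unfold Spec_display_binomial; infer_instance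

-- ===== CLAIM (what is proved, stated in full; the proofs are below) =====
def Claim_equal_display_binomial : Prop := ∀ (a : Int) (b : Int) (n : Int), Dom_display_binomial a b n → Spec_display_binomial a b n (display_binomial a b n)

-- ===== LEMMAS AND PROOFS =====

-- A's accumulation of the three lists, over any key list
theorem getA_lists (a b n : Int) (ks : List Int) (s0 : Int) (l1 l2 l3 : List Int) :
    ks.foldl
      (fun (st : Int × List Int × List Int × List Int) k =>
        (st.1 + pyComb n k * a ^ (n - k).toNat * b ^ k.toNat,
         st.2.1 ++ [pyComb n k],
         st.2.2.1 ++ [n - k],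
         st.2.2.2 ++ [k]))
      (s0, l1, l2, l3)
    = (ks.foldl (fun s k => s + pyComb n k * a ^ (n - k).toNat * b ^ k.toNat) s0,
       l1 ++ ks.map (fun k => pyComb n k),
       l2 ++ ks.map (fun k => n - k),
       l3 ++ ks) := by
  induction ks generalizing s0 l1 l2 l3 with
  | nil => simp
  | cons k ks ih => simp [List.foldl_cons, ih]

theorem zip_three_maps {α β γ : Type} (f : α → β) (g : α → γ) (ks : List α) :
    List.zip (ks.map f) (List.zip (ks.map g) ks)
      = ks.map (fun k => (f k, g k, k)) := by
  induction ks with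
  | nil => rfl
  | cons k ks ih => simp [ih]

-- glue for the joined string, on the Chars side
theorem foldl_glue_pull (sep x y : List Char) (l : List (List Char)) :
    l.foldl (fun acc q => acc ++ sep ++ q) (x ++ y)
      = x ++ l.foldl (fun acc q => acc ++ sep ++ q) y := by
  induction l generalizing y with
  | nil => rfl
  | cons q l ih => simp [List.foldl_cons, List.append_assoc]

theorem chars_join_eq_foldl (sep p : List Char) (rest : List (List Char)) :
    PySem.Chars.join sep (p :: rest) = rest.foldl (fun acc q => acc ++ sep ++ q) p := by
  induction rest generalizing p with
  | nil => simp [PySem.Chars.join_singleton]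
  | cons q rest ih =>
    rw [PySem.Chars.join_cons_cons, ih q, List.foldl_cons]
    have := foldl_glue_pull sep (p ++ sep) q rest
    simpa [List.append_assoc] using this.symm

theorem toList_foldl_glue (ts : List String) (t : String) :
    (ts.foldl (fun acc u => acc ++ " + " ++ u) t).toList
      = (ts.map String.toList).foldl (fun acc q => acc ++ (" + ").toList ++ q) t.toList := by
  induction ts generalizing t with
  | nil => rfl
  | cons u ts ih => simp [List.foldl_cons, ih, String.toList_append]

-- ' + '.join(t :: ts) as a left fold
theorem join_eq_foldl (t : String) (ts : List String) :
    PySem.Str.join " + " (t :: ts) = ts.foldl (fun acc u => acc ++ " + " ++ u) t := by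
  apply String.toList_inj.mp
  rw [PySem.Str.toList_join, toList_foldl_glue]
  simpa using chars_join_eq_foldl (" + ").toList t.toList (ts.map String.toList)

-- A's enumerate loop on indices ≥ 1 is the plain glue fold
theorem enum_fold_tail (ts : List (Int × Int × Int)) (s : Int) (hs : 1 ≤ s) (acc : String) :
    (PySem.List.enumerate ts s).foldl
      (fun poly p =>
        if p.1 == 0 then poly ++ fmtTerm p.2.1 p.2.2.1 p.2.2.2
        else poly ++ " + " ++ fmtTerm p.2.1 p.2.2.1 p.2.2.2) acc
    = ts.foldl (fun poly p => poly ++ " + " ++ fmtTerm p.1 p.2.1 p.2.2) acc := by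
  induction ts generalizing s acc with
  | nil => rfl
  | cons p ts ih =>
    rw [PySem.List.enumerate_cons, List.foldl_cons, List.foldl_cons, if_neg]
    · exact ih (s + 1) (by omega) _
    · simp; omega

-- A's whole display loop is ' + '.join of the per-triple terms
theorem enum_fold_join (ts : List (Int × Int × Int)) :
    (PySem.List.enumerate ts).foldl
      (fun poly p =>
        if p.1 == 0 then poly ++ fmtTerm p.2.1 p.2.2.1 p.2.2.2
        else poly ++ " + " ++ fmtTerm p.2.1 p.2.2.1 p.2.2.2) ""
    = PySem.Str.join " + " (ts.map (fun p => fmtTerm p.1 p.2.1 p.2.2)) := by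
  cases ts with
  | nil => rfl
  | cons p ts =>
    rw [PySem.List.enumerate_cons, List.foldl_cons, if_pos (by simp), String.empty_append,
      List.map_cons, join_eq_foldl]
    show List.foldl _ (fmtTerm p.1 p.2.1 p.2.2) (PySem.List.enumerate ts 1) = _
    rw [enum_fold_tail ts 1 (le_refl 1), List.foldl_map]

-- B's loop invariant: coefficient follows Pascal's recurrence
theorem alt_fold_inv (n : Int) (hn : 0 ≤ n) (m : Nat) (hm : m ≤ n.toNat + 1) :
    ((List.range m).map (fun (k : Nat) => (k : Int))).foldl
      (fun (st : List String × Int) k =>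
        (st.1 ++ [fmtTerm st.2 (n - k) k], PySem.Int.floordiv (st.2 * (n - k)) (k + 1)))
      ([], 1)
    = ((List.range m).map (fun k => fmtTerm (Nat.choose n.toNat k : Int) (n - k) k),
       (Nat.choose n.toNat m : Int)) := by
  induction m with
  | zero => simp
  | succ m ih =>
    have hmn : m ≤ n.toNat := by omega
    rw [List.range_succ, List.map_append, List.foldl_append, ih (by omega)]
    simp only [List.map_cons, List.map_nil, List.foldl_cons, List.foldl_nil, Prod.mk.injEq]
    constructor
    · simp
    · have hc : ((n.toNat - m : Nat) : Int) = n - (m : Int) := by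
        rw [Nat.cast_sub hmn, Int.toNat_of_nonneg hn]
      have h2 : (Nat.choose n.toNat m : Int) * (n - (m : Int))
          = ((Nat.choose n.toNat m * (n.toNat - m) : Nat) : Int) := by
        rw [← hc]; push_cast; ring
      have h3 : ((m : Int) + 1) = ((m + 1 : Nat) : Int) := by push_cast; ring
      rw [h2, h3, PySem.Int.floordiv_natCast,
        (Nat.choose_succ_right_eq n.toNat m).symm,
        Nat.mul_div_cancel _ (by omega : 0 < m + 1)]

theorem join_empty : PySem.Str.join " + " [] = "" :=
  String.toList_inj.mp (by simp [PySem.Str.toList_join, PySem.Chars.join_nil])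

theorem display_binomial_eq_alt (a b n : Int) : display_binomial a b n = display_binomial_alt a b n := by
  by_cases hn : 0 ≤ n
  · have hr : PySem.List.pyRange 0 (n + 1) 1 = (List.range (n.toNat + 1)).map (fun (k : Nat) => (k : Int)) := by
      rw [PySem.List.pyRange_one]
      have : (n + 1 - 0).toNat = n.toNat + 1 := by omega
      rw [this]; simp only [zero_add]
    unfold display_binomial display_binomial_alt get_binomial
    rw [hr, getA_lists, alt_fold_inv n hn (n.toNat + 1) (le_refl _)]
    simp only [List.nil_append]
    rw [zip_three_maps, enum_fold_join, List.map_map, List.map_map]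
    congr 1
  · have hr : PySem.List.pyRange 0 (n + 1) 1 = [] := PySem.List.pyRange_one_eq_nil (by omega)
    unfold display_binomial display_binomial_alt get_binomial
    rw [hr]
    simp [join_empty]

-- ===== VERDICT (by name: the statement is the Claim_ definition above) =====
theorem display_binomial_spec : Claim_equal_display_binomial := by
  intro a b n _
  unfold Spec_display_binomial
  exact display_binomial_eq_alt a b n
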